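-- pv_equiv track=rewrite | github.com/python-ansible/Leetcode | 周赛/周赛237/4.py | getXORSum
-- ===== SOURCE A (Python) =====
-- def getXORSum(arr1, arr2):
--     """
--     :type arr1: List[int]
--     :type arr2: List[int]
--     :rtype: int
--     """
--     from itertools import product
--     s = product(arr1,arr2)
--     s2 = [x&y for x,y in s]
--     res = 0
--     for i in s2:
--         res ^= i
--     return res
-- ===== SOURCE B (Python) =====
-- def getXORSum(arr1, arr2):
--     """
--     :type arr1: List[int]
--     :type arr2: List[int]
--     :rtype: int
--     """
--     x1 = 0
--     for a in arr1:
--         x1 ^= a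
--     x2 = 0
--     for b in arr2:
--         x2 ^= b
--     return x1 & x2
-- ===== Notes on version B (the rewrite author's own statement) =====
-- stated objective: faster
-- what changed: Replaced the O(n*m) XOR over all pairwise ANDs with (XOR of arr1) & (XOR of arr2), using the distributivity of AND over XOR.
import Mathlib
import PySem

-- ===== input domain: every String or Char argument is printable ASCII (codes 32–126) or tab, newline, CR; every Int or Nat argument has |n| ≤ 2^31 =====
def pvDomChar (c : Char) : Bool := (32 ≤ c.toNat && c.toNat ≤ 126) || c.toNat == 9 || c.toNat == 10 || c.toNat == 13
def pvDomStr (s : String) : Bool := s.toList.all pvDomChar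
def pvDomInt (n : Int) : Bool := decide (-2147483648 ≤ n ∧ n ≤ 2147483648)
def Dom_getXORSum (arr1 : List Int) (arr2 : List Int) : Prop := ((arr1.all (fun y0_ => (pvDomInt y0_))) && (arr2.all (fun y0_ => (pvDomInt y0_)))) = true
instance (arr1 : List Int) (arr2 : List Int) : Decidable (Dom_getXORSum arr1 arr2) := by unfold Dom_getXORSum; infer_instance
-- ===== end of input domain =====

-- B replaces A's O(n*m) XOR over all pairwise ANDs by (XOR arr1) & (XOR arr2), using distributivity of AND over XOR; asymptotically faster.

-- ===== PORT A =====
-- s = product(arr1, arr2); s2 = [x & y for x, y in s]; res = 0; for i in s2: res ^= i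
def getXORSum (arr1 : List Int) (arr2 : List Int) : Int :=
  let s2 : List Int := arr1.flatMap (fun x => arr2.map (fun y => PySem.Int.band x y))
  s2.foldl (fun res i => PySem.Int.bxor res i) 0

-- ===== PORT B =====
-- x1 = XOR of arr1; x2 = XOR of arr2; return x1 & x2
def getXORSum_alt (arr1 : List Int) (arr2 : List Int) : Int :=
  let x1 : Int := arr1.foldl (fun acc a => PySem.Int.bxor acc a) 0
  let x2 : Int := arr2.foldl (fun acc b => PySem.Int.bxor acc b) 0
  PySem.Int.band x1 x2

-- ===== PRECONDITION & SPEC =====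
def Spec_getXORSum (arr1 : List Int) (arr2 : List Int) (out : Int) : Prop := out = getXORSum_alt arr1 arr2
instance (arr1 : List Int) (arr2 : List Int) (out : Int) : Decidable (Spec_getXORSum arr1 arr2 out) := by unfold Spec_getXORSum; infer_instance

-- ===== CLAIM (what is proved, stated in full; the proofs are below) =====
def Claim_equal_getXORSum : Prop := ∀ (arr1 : List Int) (arr2 : List Int), Dom_getXORSum arr1 arr2 → Spec_getXORSum arr1 arr2 (getXORSum arr1 arr2)

-- ===== LEMMAS AND PROOFS =====

-- bit 0 of &&& and ^^^ on Nat, as mod-2 arithmetic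
theorem pv_mod_two_and (m n : Nat) : (m &&& n) % 2 = m % 2 * (n % 2) := by
  have h : (m &&& n).testBit 0 = (m.testBit 0 && n.testBit 0) := Nat.testBit_and m n 0
  rcases Nat.mod_two_eq_zero_or_one m with hm | hm <;>
    rcases Nat.mod_two_eq_zero_or_one n with hn | hn <;>
      rcases Nat.mod_two_eq_zero_or_one (m &&& n) with ha | ha <;>
        simp_all [Nat.testBit_zero]

theorem pv_mod_two_xor (m n : Nat) : (m ^^^ n) % 2 = (m % 2 + n % 2) % 2 := by
  have h : (m ^^^ n).testBit 0 = (Bool.xor (m.testBit 0) (n.testBit 0)) := Nat.testBit_xor m n 0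
  rcases Nat.mod_two_eq_zero_or_one m with hm | hm <;>
    rcases Nat.mod_two_eq_zero_or_one n with hn | hn <;>
      rcases Nat.mod_two_eq_zero_or_one (m ^^^ n) with ha | ha <;>
        simp_all [Nat.testBit_zero]

-- subtracting a submask is XOR with it
theorem pv_sub_and (m : Nat) : ∀ n, m - (m &&& n) = m ^^^ (m &&& n) := by
  induction m using Nat.strong_induction_on with
  | _ m ih =>
    intro n
    rcases Nat.eq_zero_or_pos m with hm | hm
    · simp [hm]
    have ihh := ih (m / 2) (Nat.div_lt_self hm (by norm_num)) (n / 2)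
    have h1 : (m &&& n) / 2 = m / 2 &&& n / 2 := Nat.and_div_two
    have h2 : (m &&& n) % 2 = m % 2 * (n % 2) := pv_mod_two_and m n
    have h3 : (m ^^^ (m &&& n)) / 2 = m / 2 ^^^ (m &&& n) / 2 := Nat.xor_div_two
    have h4 : (m ^^^ (m &&& n)) % 2 = (m % 2 + (m &&& n) % 2) % 2 := pv_mod_two_xor m (m &&& n)
    have h5 : m / 2 &&& n / 2 ≤ m / 2 := Nat.and_le_left
    have e1 := Nat.div_add_mod m 2
    have e2 := Nat.div_add_mod (m &&& n) 2
    have e3 := Nat.div_add_mod (m ^^^ (m &&& n)) 2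
    rw [h1] at h3
    rcases Nat.mod_two_eq_zero_or_one m with hb | hb <;>
      rcases Nat.mod_two_eq_zero_or_one n with hc | hc <;>
        rw [hb, hc] at h2 <;> norm_num at h2 <;> omega

-- Int extensionality by testBit
theorem pv_int_ext {m n : Int} (h : ∀ k, m.testBit k = n.testBit k) : m = n := by
  have big : ∀ (a b : Nat), a.testBit (a + b) = false := by
    intro a b
    exact Nat.testBit_lt_two_pow (lt_of_lt_of_le (Nat.lt_two_pow_self)
      (Nat.pow_le_pow_right (by norm_num) (Nat.le_add_right a b)))
  cases m with
  | ofNat a =>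
    cases n with
    | ofNat b =>
      have : a = b := Nat.eq_of_testBit_eq (fun k => by simpa [Int.testBit] using h k)
      simp [this]
    | negSucc b =>
      exfalso
      have hk := h (a + b)
      have hb : b.testBit (a + b) = false := by rw [Nat.add_comm]; exact big b a
      simp [Int.testBit, big a b, hb] at hk
  | negSucc a =>
    cases n with
    | ofNat b =>
      exfalso
      have hk := h (a + b)
      have hb : b.testBit (a + b) = false := by rw [Nat.add_comm]; exact big b a
      simp [Int.testBit, big a b, hb] at hk
    | negSucc b =>
      have : a = b := Nat.eq_of_testBit_eq (fun k => by
        have hk := h k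
        simp [Int.testBit] at hk
        exact hk)
      simp [this]

theorem pv_negSucc_eq' (X : Nat) : -(X : Int) - 1 = Int.negSucc X := by
  rw [Int.negSucc_eq]; ring

-- testBit of PySem.Int.band
theorem pv_testBit_band (a b : Int) (k : Nat) :
    (PySem.Int.band a b).testBit k = (a.testBit k && b.testBit k) := by
  cases a with
  | ofNat m =>
    cases b with
    | ofNat n =>
      simp [PySem.Int.band, Int.testBit, Nat.testBit_and]
    | negSucc n =>
      have hb : ¬ (0 : Int) ≤ Int.negSucc n := by simp only [Int.negSucc_eq]; omega
      have harg : (-(Int.negSucc n) - 1).toNat = n := by simp only [Int.negSucc_eq]; omega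
      simp only [PySem.Int.band, Int.ofNat_eq_natCast, Int.natCast_nonneg, if_true, hb,
        if_false, harg, Int.toNat_natCast]
      rw [pv_sub_and m n]
      cases hm : m.testBit k <;> cases hn : n.testBit k <;>
        simp [Int.testBit, Nat.testBit_xor, Nat.testBit_and, hm, hn]
  | negSucc m =>
    have ha : ¬ (0 : Int) ≤ Int.negSucc m := by simp only [Int.negSucc_eq]; omega
    have harga : (-(Int.negSucc m) - 1).toNat = m := by simp only [Int.negSucc_eq]; omega
    cases b with
    | ofNat n =>
      simp only [PySem.Int.band, ha, if_false, Int.ofNat_eq_natCast, Int.natCast_nonneg, if_true,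
        harga, Int.toNat_natCast]
      rw [pv_sub_and n m]
      cases hm : m.testBit k <;> cases hn : n.testBit k <;>
        simp [Int.testBit, Nat.testBit_xor, Nat.testBit_and, hm, hn]
    | negSucc n =>
      have hb : ¬ (0 : Int) ≤ Int.negSucc n := by simp only [Int.negSucc_eq]; omega
      have hargb : (-(Int.negSucc n) - 1).toNat = n := by simp only [Int.negSucc_eq]; omega
      simp only [PySem.Int.band, ha, hb, if_false, harga, hargb]
      rw [pv_negSucc_eq' (m ||| n)]
      simp [Int.testBit, Nat.testBit_or]

-- testBit of PySem.Int.bxor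
theorem pv_testBit_bxor (a b : Int) (k : Nat) :
    (PySem.Int.bxor a b).testBit k = (Bool.xor (a.testBit k) (b.testBit k)) := by
  cases a with
  | ofNat m =>
    cases b with
    | ofNat n =>
      simp [PySem.Int.bxor, Int.testBit, Nat.testBit_xor]
    | negSucc n =>
      have hb : ¬ (0 : Int) ≤ Int.negSucc n := by simp only [Int.negSucc_eq]; omega
      have harg : (-(Int.negSucc n) - 1).toNat = n := by simp only [Int.negSucc_eq]; omega
      simp only [PySem.Int.bxor, Int.ofNat_eq_natCast, Int.natCast_nonneg, if_true, hb, if_false,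
        harg, Int.toNat_natCast]
      rw [pv_negSucc_eq' (m ^^^ n)]
      cases hm : m.testBit k <;> cases hn : n.testBit k <;>
        simp [Int.testBit, Nat.testBit_xor, hm, hn]
  | negSucc m =>
    have ha : ¬ (0 : Int) ≤ Int.negSucc m := by simp only [Int.negSucc_eq]; omega
    have harga : (-(Int.negSucc m) - 1).toNat = m := by simp only [Int.negSucc_eq]; omega
    cases b with
    | ofNat n =>
      simp only [PySem.Int.bxor, ha, if_false, Int.ofNat_eq_natCast, Int.natCast_nonneg, if_true,
        harga, Int.toNat_natCast]
      rw [pv_negSucc_eq' (m ^^^ n)]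
      cases hm : m.testBit k <;> cases hn : n.testBit k <;>
        simp [Int.testBit, Nat.testBit_xor, hm, hn]
    | negSucc n =>
      have hb : ¬ (0 : Int) ≤ Int.negSucc n := by simp only [Int.negSucc_eq]; omega
      have hargb : (-(Int.negSucc n) - 1).toNat = n := by simp only [Int.negSucc_eq]; omega
      simp only [PySem.Int.bxor, ha, hb, if_false, harga, hargb]
      cases hm : m.testBit k <;> cases hn : n.testBit k <;>
        simp [Int.testBit, Nat.testBit_xor, hm, hn]

theorem pv_testBit_zero (k : Nat) : (0 : Int).testBit k = false := by
  simp [Int.testBit]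

-- algebraic laws
theorem pv_zero_bxor (a : Int) : PySem.Int.bxor 0 a = a :=
  pv_int_ext (fun k => by simp [pv_testBit_bxor, pv_testBit_zero])

theorem pv_bxor_assoc (a b c : Int) :
    PySem.Int.bxor (PySem.Int.bxor a b) c = PySem.Int.bxor a (PySem.Int.bxor b c) :=
  pv_int_ext (fun k => by simp [pv_testBit_bxor])

theorem pv_band_zero_left (a : Int) : PySem.Int.band 0 a = 0 :=
  pv_int_ext (fun k => by simp [pv_testBit_band, pv_testBit_zero])

theorem pv_band_bxor_left (x a b : Int) :
    PySem.Int.band x (PySem.Int.bxor a b)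
      = PySem.Int.bxor (PySem.Int.band x a) (PySem.Int.band x b) :=
  pv_int_ext (fun k => by
    simp [pv_testBit_band, pv_testBit_bxor]
    cases x.testBit k <;> cases a.testBit k <;> cases b.testBit k <;> rfl)

theorem pv_band_bxor_right (a b z : Int) :
    PySem.Int.band (PySem.Int.bxor a b) z
      = PySem.Int.bxor (PySem.Int.band a z) (PySem.Int.band b z) :=
  pv_int_ext (fun k => by
    simp [pv_testBit_band, pv_testBit_bxor]
    cases a.testBit k <;> cases b.testBit k <;> cases z.testBit k <;> rfl)

-- fold facts
theorem pv_foldl_bxor (l : List Int) : ∀ a : Int,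
    l.foldl (fun acc x => PySem.Int.bxor acc x) a
      = PySem.Int.bxor a (l.foldl (fun acc x => PySem.Int.bxor acc x) 0) := by
  induction l with
  | nil => intro a; simp
  | cons x t ih =>
    intro a
    simp only [List.foldl_cons]
    rw [ih (PySem.Int.bxor a x), ih (PySem.Int.bxor 0 x), pv_zero_bxor, pv_bxor_assoc]

theorem pv_X_append (l1 l2 : List Int) :
    (l1 ++ l2).foldl (fun acc x => PySem.Int.bxor acc x) 0
      = PySem.Int.bxor (l1.foldl (fun acc x => PySem.Int.bxor acc x) 0)
          (l2.foldl (fun acc x => PySem.Int.bxor acc x) 0) := by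
  rw [List.foldl_append, pv_foldl_bxor]

theorem pv_X_map_band (x : Int) (l : List Int) :
    (l.map (fun y => PySem.Int.band x y)).foldl (fun acc i => PySem.Int.bxor acc i) 0
      = PySem.Int.band x (l.foldl (fun acc y => PySem.Int.bxor acc y) 0) := by
  induction l with
  | nil => simp
  | cons y t ih =>
    simp only [List.map_cons, List.foldl_cons]
    rw [pv_foldl_bxor, pv_foldl_bxor t, ih, pv_zero_bxor, pv_zero_bxor, pv_band_bxor_left]

theorem pv_main (arr1 arr2 : List Int) :
    (arr1.flatMap (fun x => arr2.map (fun y => PySem.Int.band x y))).foldl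
        (fun res i => PySem.Int.bxor res i) 0
      = PySem.Int.band (arr1.foldl (fun acc a => PySem.Int.bxor acc a) 0)
          (arr2.foldl (fun acc b => PySem.Int.bxor acc b) 0) := by
  induction arr1 with
  | nil => simp [pv_band_zero_left]
  | cons x t ih =>
    simp only [List.flatMap_cons, List.foldl_cons]
    rw [pv_X_append, pv_X_map_band, ih, ← pv_band_bxor_right]
    congr 1
    rw [pv_foldl_bxor t (PySem.Int.bxor 0 x), pv_zero_bxor]

-- ===== VERDICT (by name: the statement is the Claim_ definition above) =====
theorem getXORSum_spec : Claim_equal_getXORSum := by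
  intro arr1 arr2 _
  unfold Spec_getXORSum getXORSum getXORSum_alt
  exact pv_main arr1 arr2
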